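-- pv_equiv track=rewrite | github.com/gudasergey/pyFitIt | pyfitit/adf.py | nextWord
-- ===== SOURCE A (Python) =====
-- def nextWord(s, i0, ignoreNewLine=False):
--     """
--     Find word from position i
--     :param s: text string
--     :param i0: current position
--     :param ignoreNewLine: pass newline, when search for word
--     :return: word, positionJustAfterWord. None, None if end of string or newline encountered
--     """
--     if i0 >= len(s): return None, None
--     allwhitespace = [' ', '\t', '\n', '\r']
--     whitespace = [' ', '\t']
--     if ignoreNewLine: whitespace = allwhitespace
--     i = i0
--     while s[i] in whitespace:
--         i += 1
--         if i >= len(s): return None, None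
--     if s[i] in allwhitespace: return None, None  # pass newline and ignoreNewLine=False
--     k = i
--     while s[k] not in allwhitespace:
--         k += 1
--         if k >= len(s): return s[i:k], k
--     word = s[i:k]
--     return word, k
-- ===== SOURCE B (Python) =====
-- import re
--
-- _PAT_NL = re.compile(r'[ \t\n\r]*([^ \t\n\r]+)')   # skip any whitespace incl. newlines
-- _PAT    = re.compile(r'[ \t]*([^ \t\n\r]+)')       # skip only spaces/tabs
--
-- def nextWord(s, i0, ignoreNewLine=False):
--     m = (_PAT_NL if ignoreNewLine else _PAT).match(s, i0)
--     if m is None: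
--         return None, None
--     return m.group(1), m.end()
-- ===== Notes on version B (the rewrite author's own statement) =====
-- stated objective: idiomatic
-- what changed: Replaces A's hand-written index-stepping whitespace/word scanning loops with a single anchored regular-expression match (leading skip class followed by a captured run of non-whitespace), reading word and end position off the match object; the C-level regex engine also makes it measurably faster.
-- outside the precondition, e.g. on nextWord('  abc', -3, False): A returns ('', 0), B returns ('abc', 5)
import Mathlib
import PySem

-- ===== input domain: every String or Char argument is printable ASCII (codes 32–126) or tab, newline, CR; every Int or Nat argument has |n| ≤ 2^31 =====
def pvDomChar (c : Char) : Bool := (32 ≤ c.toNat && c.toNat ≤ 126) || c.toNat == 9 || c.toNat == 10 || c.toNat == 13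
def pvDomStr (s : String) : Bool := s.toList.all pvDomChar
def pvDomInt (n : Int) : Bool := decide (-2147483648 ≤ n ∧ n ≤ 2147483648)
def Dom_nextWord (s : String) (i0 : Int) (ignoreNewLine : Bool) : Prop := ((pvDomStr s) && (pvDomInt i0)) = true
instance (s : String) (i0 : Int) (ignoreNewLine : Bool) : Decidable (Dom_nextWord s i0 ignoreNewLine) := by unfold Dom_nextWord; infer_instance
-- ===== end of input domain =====

-- B replaces A's hand-written scanning loops by one anchored regular-expression match
-- '[skip]*([^ \t\n\r]+)' (objective: idiomatic). Return-value equivalence, proved on Pre_ (0 ≤ i0).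

-- ===== PORT A =====
-- while s[i] in whitespace: i += 1; if i >= len(s): return None, None   (entered with i < len(s))
def nextWordLoop1 (cs ws : List Char) (i : Nat) : Option Nat :=
  if h : i < cs.length then
    if ws.contains (cs[i]) then nextWordLoop1 cs ws (i + 1) else some i
  else none
  termination_by cs.length - i

-- while s[k] not in allwhitespace: k += 1; if k >= len(s): return s[i:k], k
def nextWordLoop2 (cs allws : List Char) (k : Nat) : Nat :=
  if h : k < cs.length then
    if allws.contains (cs[k]) then k else nextWordLoop2 cs allws (k + 1)
  else k
  termination_by cs.length - k

def nextWord (s : String) (i0 : Int) (ignoreNewLine : Bool) : Option String × Option Int :=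
  if (s.length : Int) ≤ i0 then (none, none)
  else
    let cs := s.toList
    let allws : List Char := [' ', '\t', '\n', '\r']
    let ws : List Char := if ignoreNewLine then allws else [' ', '\t']
    -- i0.toNat: exact for 0 ≤ i0 (Pre_); negative i0 (Python wraparound indexing) is outside Pre_
    match nextWordLoop1 cs ws i0.toNat with
    | none => (none, none)
    | some i =>
      if allws.contains (cs.getD i ' ') then (none, none)
      else
        let k := nextWordLoop2 cs allws i
        -- s[i:k] with 0 ≤ i ≤ k ≤ len(s): exact as drop/take
        (some (String.ofList ((cs.drop i).take (k - i))), some (k : Int))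

-- ===== PORT B =====
-- Hand port of the re engine on the fixed pattern class₁*(class₂+) anchored at pos, exact for
-- character-class regexes: the greedy star enumerates its candidate end positions longest-first
-- (re's backtracking order) …
def reStarEnds (p : Char → Bool) (cs : List Char) (k : Nat) : List Nat :=
  if h : k < cs.length then
    if p cs[k] then reStarEnds p cs (k + 1) ++ [k] else [k]
  else [k]
  termination_by cs.length - k

-- … the '+' needs one char of its class, then greedily extends (nothing follows the group in
-- the pattern, so the greedy end is the match end) …
def rePlusEnd (p : Char → Bool) (cs : List Char) (k : Nat) : Option Nat :=
  if h : k < cs.length then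
    if p cs[k] then
      match rePlusEnd p cs (k + 1) with
      | some e => some e
      | none => some (k + 1)
    else none
  else none
  termination_by cs.length - k

-- … and the match is the first star candidate from which the '+' succeeds: (group start, end).
def reMatchSkipWord (skip word : Char → Bool) (cs : List Char) (pos : Nat) : Option (Nat × Nat) :=
  (reStarEnds skip cs pos).findSome? (fun k => (rePlusEnd word cs k).map (fun e => (k, e)))

def nextWord_alt (s : String) (i0 : Int) (ignoreNewLine : Bool) : Option String × Option Int :=
  let skip : Char → Bool := if ignoreNewLine then (fun c => c = ' ' ∨ c = '\t' ∨ c = '\n' ∨ c = '\r') else (fun c => c = ' ' ∨ c = '\t')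
  let word : Char → Bool := fun c => ¬(c = ' ' ∨ c = '\t' ∨ c = '\n' ∨ c = '\r')  -- [^ \t\n\r]
  let cs := s.toList
  -- pattern.match(s, i0): re clamps a negative pos to 0 (i0.toNat does the same); pos past the
  -- end simply yields no match
  match reMatchSkipWord skip word cs i0.toNat with
  | none => (none, none)
  | some (k, e) => (some (String.ofList ((cs.drop k).take (e - k))), some (e : Int))

-- ===== PRECONDITION & SPEC =====
-- Pre_ restricts to the natural domain of nonnegative positions: for negative i0 A indexes via
-- Python's wraparound (scanning can jump from the end of the string back to its start, yielding
-- accidental values such as an empty word, and raising IndexError for i0 < -len(s)), while B's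
-- re.match clamps a negative pos to 0; no caller relies on negative positions.
def Pre_nextWord (s : String) (i0 : Int) (ignoreNewLine : Bool) : Prop := 0 ≤ i0
instance (s : String) (i0 : Int) (ignoreNewLine : Bool) : Decidable (Pre_nextWord s i0 ignoreNewLine) := by unfold Pre_nextWord; infer_instance
def pvWitness_nextWord : String × Int × Bool := ("  hello world", 0, false)

def Spec_nextWord (s : String) (i0 : Int) (ignoreNewLine : Bool) (out : Option String × Option Int) : Prop := out = nextWord_alt s i0 ignoreNewLine
instance (s : String) (i0 : Int) (ignoreNewLine : Bool) (out : Option String × Option Int) : Decidable (Spec_nextWord s i0 ignoreNewLine out) := by unfold Spec_nextWord; infer_instance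

-- ===== CLAIM (what is proved, stated in full; the proofs are below) =====
def Claim_equal_nextWord : Prop := ∀ (s : String) (i0 : Int) (ignoreNewLine : Bool), Dom_nextWord s i0 ignoreNewLine → Pre_nextWord s i0 ignoreNewLine → Spec_nextWord s i0 ignoreNewLine (nextWord s i0 ignoreNewLine)

-- ===== LEMMAS AND PROOFS =====

theorem nextWordLoop1_eq (cs ws : List Char) (i : Nat) :
    nextWordLoop1 cs ws i =
      match (cs.drop i).dropWhile (ws.contains ·) with
      | [] => none
      | _ :: _ => some (i + ((cs.drop i).takeWhile (ws.contains ·)).length) := by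
  fun_induction nextWordLoop1 cs ws i with
  | case1 i h hmem ih =>
    rw [List.drop_eq_getElem_cons h]
    simp only [List.dropWhile_cons, List.takeWhile_cons, hmem, if_pos, ih,
      List.drop_eq_getElem_cons, List.length_cons]
    cases hdw : (cs.drop (i + 1)).dropWhile (ws.contains ·) <;> simp <;> omega
  | case2 i h hmem =>
    rw [List.drop_eq_getElem_cons h, List.dropWhile_cons, List.takeWhile_cons,
      if_neg hmem, if_neg hmem]
    simp
  | case3 i h =>
    rw [List.drop_eq_nil_of_le (by omega)]
    simp

theorem nextWordLoop2_eq (cs allws : List Char) (k : Nat) :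
    nextWordLoop2 cs allws k = k + ((cs.drop k).takeWhile (fun x => !allws.contains x)).length := by
  fun_induction nextWordLoop2 cs allws k with
  | case1 k h hmem =>
    have hmem' : cs[k] ∈ allws := by simpa using hmem
    rw [List.drop_eq_getElem_cons h]
    simp [List.takeWhile_cons, hmem']
  | case2 k h hmem ih =>
    rw [List.drop_eq_getElem_cons h]
    simp only [List.takeWhile_cons, hmem, Bool.not_false, if_pos, List.length_cons, ih]
    omega
  | case3 k h =>
    rw [List.drop_eq_nil_of_le (by omega)]
    simp

theorem dropWhile_eq_drop_takeWhile (l : List Char) (p : Char → Bool) :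
    l.dropWhile p = l.drop (l.takeWhile p).length := by
  induction l with
  | nil => simp
  | cons a t ih =>
    by_cases h : p a <;> simp [List.dropWhile_cons, List.takeWhile_cons, h, ih]

theorem reStarEnds_eq (p : Char → Bool) (cs : List Char) (k : Nat) :
    reStarEnds p cs k =
      (k + ((cs.drop k).takeWhile p).length) ::
        (List.range' k ((cs.drop k).takeWhile p).length).reverse := by
  fun_induction reStarEnds p cs k with
  | case1 k h hp ih =>
    rw [List.drop_eq_getElem_cons h]
    simp only [List.takeWhile_cons, hp, if_pos, List.length_cons, ih]
    rw [List.range'_succ, List.reverse_cons]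
    simp [List.cons_append]
    omega
  | case2 k h hp =>
    rw [List.drop_eq_getElem_cons h]
    simp [List.takeWhile_cons, hp]
  | case3 k h =>
    rw [List.drop_eq_nil_of_le (by omega)]
    simp

theorem rePlusEnd_eq (p : Char → Bool) (cs : List Char) (k : Nat) :
    rePlusEnd p cs k =
      if h : k < cs.length then
        if p cs[k] then some (k + ((cs.drop k).takeWhile p).length) else none
      else none := by
  fun_induction rePlusEnd p cs k with
  | case4 k h =>
    rw [dif_neg h]
  | case3 k h hp =>
    rw [dif_pos h, if_neg hp]
  | case1 k h hp e he ih =>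
    rw [dif_pos h, if_pos hp, List.drop_eq_getElem_cons h]
    simp only [List.takeWhile_cons, hp, if_pos, List.length_cons]
    rw [he] at ih
    by_cases h2 : k + 1 < cs.length
    · rw [dif_pos h2] at ih
      by_cases hp2 : p cs[k + 1]
      · rw [if_pos hp2] at ih
        have := ih.symm
        simp only [Option.some.injEq] at this ⊢
        omega
      · rw [if_neg hp2] at ih; exact absurd ih (by simp)
    · rw [dif_neg h2] at ih; exact absurd ih (by simp)
  | case2 k h hp he ih =>
    rw [dif_pos h, if_pos hp, List.drop_eq_getElem_cons h]
    simp only [List.takeWhile_cons, hp, if_pos, List.length_cons]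
    rw [he] at ih
    have hz : ((cs.drop (k + 1)).takeWhile p).length = 0 := by
      by_cases h2 : k + 1 < cs.length
      · rw [dif_pos h2] at ih
        by_cases hp2 : p cs[k + 1]
        · rw [if_pos hp2] at ih; exact absurd ih (by simp)
        · rw [List.drop_eq_getElem_cons h2, List.takeWhile_cons, if_neg hp2]
          simp
      · rw [List.drop_eq_nil_of_le (by omega)]
        simp
    simp [hz]

-- chars strictly inside the skipped run satisfy the skip predicate
theorem takeWhile_getElem_sat (l : List Char) (p : Char → Bool) (j : Nat)
    (hj : j < (l.takeWhile p).length) :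
    p (l[j]'(lt_of_lt_of_le hj (l.takeWhile_sublist p).length_le)) = true := by
  have hpre := List.takeWhile_prefix (l := l) (p := p)
  have hg : (l.takeWhile p)[j] = l[j]'(lt_of_lt_of_le hj (l.takeWhile_sublist p).length_le) :=
    hpre.getElem hj
  have := List.mem_takeWhile_imp (l := l) (p := p) (List.getElem_mem hj)
  rwa [hg] at this

-- ===== VERDICT (by name: the statement is the Claim_ definition above) =====
theorem nextWord_spec : Claim_equal_nextWord := by
  intro s i0 ign _ hpre
  obtain ⟨m, rfl⟩ : ∃ m : Nat, i0 = (m : Int) := ⟨i0.toNat, (Int.toNat_of_nonneg hpre).symm⟩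
  unfold Spec_nextWord nextWord nextWord_alt reMatchSkipWord
  simp only [Int.toNat_natCast]
  have hlen : s.toList.length = s.length := by simp
  set cs := s.toList with hcs
  set allws : List Char := [' ', '\t', '\n', '\r'] with hallws
  set ws : List Char := if ign = true then allws else [' ', '\t'] with hws
  set skipP : Char → Bool :=
    if ign = true then (fun c => decide (c = ' ' ∨ c = '\t' ∨ c = '\n' ∨ c = '\r'))
    else (fun c => decide (c = ' ' ∨ c = '\t')) with hskipP
  set wordP : Char → Bool := fun c => decide ¬(c = ' ' ∨ c = '\t' ∨ c = '\n' ∨ c = '\r') with hwordP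
  -- the list membership tests of A and the character classes of B agree pointwise
  have hskip_eq : ∀ c : Char, ws.contains c = skipP c := by
    intro c; cases ign <;> simp [hws, hallws, hskipP, List.contains_eq_mem, or_assoc]
  have hword_eq : ∀ c : Char, wordP c = !allws.contains c := by
    intro c; simp [hwordP, hallws, List.contains_eq_mem, or_assoc]
  have hskip_ws : ∀ c : Char, skipP c = true → allws.contains c = true := by
    intro c hc; cases ign <;> simp_all [hskipP, hallws, List.contains_eq_mem] <;> tauto
  have hskip_funext : (fun x => ws.contains x) = skipP := funext hskip_eq
  have htw : (cs.drop m).takeWhile (ws.contains ·) = (cs.drop m).takeWhile skipP := by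
    rw [hskip_funext]
  set L := ((cs.drop m).takeWhile skipP).length with hL
  have hLle : m + L ≤ cs.length ∨ cs.length ≤ m := by
    by_cases h : m < cs.length
    · left
      have := (List.takeWhile_sublist (l := cs.drop m) skipP).length_le
      simp only [List.length_drop] at this
      omega
    · right; omega
  -- rest of the star's candidates (the strictly skipped positions) never start a word:
  have hrest : ∀ j ∈ (List.range' m L).reverse,
      (rePlusEnd wordP cs j).map (fun e => (j, e)) = none := by
    intro j hj
    rw [List.mem_reverse, List.mem_range'] at hj
    obtain ⟨hj1, hj2⟩ := hj
    have hjlt : j < cs.length := by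
      rcases hLle with h | h
      · omega
      · exfalso
        have : cs.drop m = [] := List.drop_eq_nil_of_le h
        rw [hL, this] at hj2; simp at hj2
    have hsat : skipP ((cs.drop m)[j - m]'(by simp; omega)) = true := by
      have := takeWhile_getElem_sat (cs.drop m) skipP (j - m) (by omega)
      exact this
    have hget : (cs.drop m)[j - m]'(by simp; omega) = cs[j]'hjlt := by
      rw [List.getElem_drop]; congr 1; omega
    rw [hget] at hsat
    have hword : wordP (cs[j]'hjlt) = false := by
      rw [hword_eq, hskip_ws _ hsat]; rfl
    rw [rePlusEnd_eq, dif_pos hjlt, if_neg (by simp [hword])]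
    rfl
  rw [reStarEnds_eq, ← hL]  -- hL via htw handled below
  by_cases hm : (s.length : Int) ≤ (m : Int)
  · -- i0 past the end: A returns immediately; B's star matches nothing and the plus fails
    rw [if_pos hm]
    have hnil : cs.drop m = [] := List.drop_eq_nil_of_le (by omega)
    have hL0 : L = 0 := by rw [hL, hnil]; simp
    simp only [hL0, List.range'_zero, List.reverse_nil, Nat.add_zero, List.findSome?_cons,
      List.findSome?_nil]
    rw [rePlusEnd_eq, dif_neg (by omega)]
    rfl
  · rw [if_neg hm]
    have hmlt : m < cs.length := by omega
    have hdw : (cs.drop m).dropWhile (ws.contains ·) = cs.drop (m + L) := by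
      rw [hskip_funext, dropWhile_eq_drop_takeWhile, ← hL, List.drop_drop, Nat.add_comm]
    have hLle' : m + L ≤ cs.length := by rcases hLle with h | h <;> omega
    rw [List.findSome?_cons, rePlusEnd_eq]
    by_cases hend : m + L < cs.length
    · -- the skip run stops at a char inside the string
      have h1 : nextWordLoop1 cs ws m = some (m + L) := by
        rw [nextWordLoop1_eq, htw, ← hL, hdw, List.drop_eq_getElem_cons hend]
      rw [dif_pos hend]
      set ch := cs[m + L] with hch
      have hgd : cs.getD (m + L) ' ' = ch := by
        rw [List.getD_eq_getElem?_getD, List.getElem?_eq_getElem hend]; rfl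
      by_cases hcw : allws.contains ch
      · -- stopped at a newline (not skipped): A bails out; B's plus fails here and on the rest
        have hwf : wordP ch = false := by rw [hword_eq, hcw]; rfl
        rw [if_neg (by simp [hwf])]
        simp only [Option.map_none, List.findSome?_eq_none_iff.mpr hrest]
        simp [h1, List.getElem?_eq_getElem hend]
        simpa using hcw
      · -- a word: A's second loop and B's greedy plus compute the same end
        have hcw' : allws.contains ch = false := by simpa using hcw
        have hwp : wordP ch = true := by rw [hword_eq, hcw']; rfl
        rw [if_pos hwp]
        have htww : (cs.drop (m + L)).takeWhile (fun x => !allws.contains x)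
            = (cs.drop (m + L)).takeWhile wordP := by
          rw [show (fun x => !allws.contains x) = wordP from funext (fun c => (hword_eq c).symm)]
        have h2 : nextWordLoop2 cs allws (m + L)
            = m + L + ((cs.drop (m + L)).takeWhile wordP).length := by
          rw [nextWordLoop2_eq, htww]
        simp [h1, List.getElem?_eq_getElem hend, h2, Nat.add_sub_cancel_left, hcw']
        simpa using hcw
    · -- whitespace to the end of the string: both return (none, none)
      have hnil : cs.drop (m + L) = [] := List.drop_eq_nil_of_le (by omega)
      have h1 : nextWordLoop1 cs ws m = none := by
        rw [nextWordLoop1_eq, htw, ← hL, hdw, hnil]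
      rw [dif_neg (by omega)]
      simp only [Option.map_none, List.findSome?_eq_none_iff.mpr hrest]
      simp [h1]
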